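-- pv_equiv track=rewrite | github.com/archiesoft/fleet_management | assign_shipment.py | find_common_string
-- ===== SOURCE A (Python) =====
-- def find_common_string(string1, string2):
--     # Initialize variables to store the length of common patterns
--     common_substrings = []
--
--     # Find the length of common substrings
--     for i in range(len(string1)):
--         for j in range(i+1, len(string1)+1):
--             if string1[i:j] in string2:
--                 if(len(string1[i:j]) > 1):
--                     common_substrings.append(len(string1[i:j]))
--     return common_substrings
-- ===== SOURCE B (Python) =====
-- def find_common_string(string1, string2):
--     # Matching statistics: for each start i, extend the longest match L carried
--     # over from i-1 (it can shrink by at most 1), then emit lengths 2..L in bulk.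
--     out = []
--     n = len(string1)
--     L = 0
--     for i in range(n):
--         if L:
--             L -= 1
--         while i + L < n and string1[i:i + L + 1] in string2:
--             L += 1
--         out.extend(range(2, L + 1))
--     return out
-- ===== Notes on version B (the rewrite author's own statement) =====
-- stated objective: faster
-- what changed: Instead of testing every substring string1[i:j] against string2, B computes for each start i the longest match L via greedy extension carried over from i-1 (matching statistics: L shrinks by at most 1 per step), then emits the lengths 2..L as one bulk range.
import Mathlib
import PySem

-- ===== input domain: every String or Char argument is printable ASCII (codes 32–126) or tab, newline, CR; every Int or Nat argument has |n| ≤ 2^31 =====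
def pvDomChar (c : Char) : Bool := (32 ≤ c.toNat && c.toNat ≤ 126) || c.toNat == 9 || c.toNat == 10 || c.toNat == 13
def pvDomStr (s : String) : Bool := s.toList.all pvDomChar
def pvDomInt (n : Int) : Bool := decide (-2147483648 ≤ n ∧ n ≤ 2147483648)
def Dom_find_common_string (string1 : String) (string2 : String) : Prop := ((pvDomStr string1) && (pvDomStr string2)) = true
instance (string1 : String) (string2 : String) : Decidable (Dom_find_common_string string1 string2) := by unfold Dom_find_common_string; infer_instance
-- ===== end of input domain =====

-- B replaces A's scan of every substring of string1 by matching statistics: the longest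
-- match at start i (carried over from i-1, shrinking by at most 1) is extended greedily,
-- and the lengths 2..L are emitted in one bulk range; objective: faster.

-- ===== PORT A =====
def find_common_string (string1 : String) (string2 : String) : List Int :=
  (PySem.List.pyRange 0 (PySem.Str.len string1) 1).foldl (fun acc i =>
    (PySem.List.pyRange (i + 1) (PySem.Str.len string1 + 1) 1).foldl (fun acc j =>
      if PySem.Str.isIn (PySem.Str.slice string1 (some i) (some j)) string2 then
        if 1 < PySem.Str.len (PySem.Str.slice string1 (some i) (some j)) then
          acc ++ [PySem.Str.len (PySem.Str.slice string1 (some i) (some j))]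
        else acc
      else acc) acc) []

-- ===== PORT B =====
-- the while loop `while i + L < n and string1[i:i+L+1] in string2: L += 1`
def pvExtend (s1 s2 : List Char) (i : Nat) (L : Nat) : Nat :=
  if i + L < s1.length ∧ PySem.Chars.isIn ((s1.drop i).take (L + 1)) s2 = true then
    pvExtend s1 s2 i (L + 1)
  else L
termination_by s1.length - (i + L)
decreasing_by omega

def find_common_string_alt (string1 : String) (string2 : String) : List Int :=
  let s1 := string1.toList
  let s2 := string2.toList
  ((List.range s1.length).foldl (fun (st : List Int × Nat) i =>
      let L0 := if st.2 ≠ 0 then st.2 - 1 else st.2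
      let K := pvExtend s1 s2 i L0
      (st.1 ++ PySem.List.pyRange 2 ((K : Int) + 1) 1, K))
    (([] : List Int), 0)).1

-- ===== PRECONDITION & SPEC =====
def Spec_find_common_string (string1 : String) (string2 : String) (out : List Int) : Prop := out = find_common_string_alt string1 string2
instance (string1 : String) (string2 : String) (out : List Int) : Decidable (Spec_find_common_string string1 string2 out) := by unfold Spec_find_common_string; infer_instance

-- ===== CLAIM (what is proved, stated in full; the proofs are below) =====
def Claim_equal_find_common_string : Prop := ∀ (string1 : String) (string2 : String), Dom_find_common_string string1 string2 → Spec_find_common_string string1 string2 (find_common_string string1 string2)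

-- ===== LEMMAS AND PROOFS =====

-- `P s1 s2 i l`: the length-l substring of s1 starting at i exists and occurs in s2
def pvP (s1 s2 : List Char) (i l : Nat) : Prop :=
  i + l ≤ s1.length ∧ PySem.Chars.isIn ((s1.drop i).take l) s2 = true

-- monotonicity: a shorter prefix of a matching slice also matches
lemma pvP_mono (s1 s2 : List Char) (i : Nat) {l l' : Nat} (h : l ≤ l')
    (hP : pvP s1 s2 i l') : pvP s1 s2 i l := by
  obtain ⟨h1, h2⟩ := hP
  refine ⟨by omega, ?_⟩
  rw [PySem.Chars.isIn_iff_infix] at h2 ⊢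
  have hpre : (s1.drop i).take l <+: (s1.drop i).take l' := by
    rw [List.prefix_take_iff]
    exact ⟨List.take_prefix _ _, by simp [h]⟩
  exact hpre.isInfix.trans h2

-- pvExtend computes the greatest l with pvP, from any valid start
lemma pvExtend_spec (s1 s2 : List Char) (i L : Nat) (h : pvP s1 s2 i L) :
    pvP s1 s2 i (pvExtend s1 s2 i L) ∧ ∀ l, pvP s1 s2 i l → l ≤ pvExtend s1 s2 i L := by
  induction L using pvExtend.induct s1 s2 i with
  | case1 L hc ih =>
    rw [pvExtend, if_pos hc]
    exact ih ⟨by omega, hc.2⟩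
  | case2 L hc =>
    rw [pvExtend, if_neg hc]
    refine ⟨h, fun l hl => ?_⟩
    by_contra hgt
    obtain ⟨hl1, hl2⟩ := hl
    have hP1 : pvP s1 s2 i (L + 1) := pvP_mono s1 s2 i (by omega) ⟨hl1, hl2⟩
    exact hc ⟨by omega, hP1.2⟩

-- carrying the previous match over to the next start stays valid
lemma pvP_shift (s1 s2 : List Char) (i K : Nat) (hK : 1 ≤ K)
    (h : pvP s1 s2 i K) : pvP s1 s2 (i + 1) (K - 1) := by
  obtain ⟨h1, h2⟩ := h
  refine ⟨by omega, ?_⟩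
  rw [PySem.Chars.isIn_iff_infix] at h2 ⊢
  have e1 : s1.drop (i + 1) = (s1.drop i).drop 1 := by
    rw [List.drop_drop]
  have e2 : ((s1.drop i).drop 1).take (K - 1) = ((s1.drop i).take K).drop 1 := by
    rw [List.drop_take]
  rw [e1, e2]
  exact (List.drop_suffix 1 _).isInfix.trans h2

-- A's inner loop over j, rewritten as one bulk range, given K = greatest matching length at i
lemma pvInnerA (s1 s2 : List Char) (i K : Nat) (hin : i < s1.length)
    (hPK : pvP s1 s2 i K) (hmax : ∀ l, pvP s1 s2 i l → l ≤ K) (acc : List Int) :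
    (PySem.List.pyRange ((i : Int) + 1) ((s1.length : Int) + 1) 1).foldl (fun acc j =>
      if PySem.Chars.isIn (PySem.List.slice s1 (some (i : Int)) (some j)) s2 then
        if 1 < ((PySem.List.slice s1 (some (i : Int)) (some j)).length : Int) then
          acc ++ [((PySem.List.slice s1 (some (i : Int)) (some j)).length : Int)]
        else acc
      else acc) acc = acc ++ PySem.List.pyRange 2 ((K : Int) + 1) 1 := by
  have hKn : i + K ≤ s1.length := hPK.1
  -- step 1: replace the body by a single test-and-append
  rw [PySem.List.foldl_congr_mem _ _
      (fun acc j => if (fun j : Int => decide ((i : Int) + 2 ≤ j ∧ j ≤ (i : Int) + (K : Int))) j = true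
                    then acc ++ [(fun j : Int => j - (i : Int)) j] else acc) _ ?_]
  · -- step 2: bulk evaluation of the filtered range
    rw [PySem.List.foldl_append_if]
    congr 1
    have hsplit : PySem.List.pyRange ((i : Int) + 1) ((s1.length : Int) + 1) 1
        = PySem.List.pyRange ((i : Int) + 1) ((i : Int) + (K : Int) + 1) 1
          ++ PySem.List.pyRange ((i : Int) + (K : Int) + 1) ((s1.length : Int) + 1) 1 :=
      PySem.List.pyRange_one_append _ _ _ (by omega) (by omega)
    rw [hsplit, List.filter_append]
    have h2nil : (PySem.List.pyRange ((i : Int) + (K : Int) + 1) ((s1.length : Int) + 1) 1).filter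
        (fun j : Int => decide ((i : Int) + 2 ≤ j ∧ j ≤ (i : Int) + (K : Int))) = [] := by
      rw [List.filter_eq_nil_iff]
      intro j hj
      rw [PySem.List.mem_pyRange_one] at hj
      simp only [decide_eq_true_eq]
      omega
    rw [h2nil, List.append_nil]
    rcases Nat.eq_zero_or_pos K with hK0 | hKpos
    · subst hK0
      rw [PySem.List.pyRange_one_eq_nil (by omega), PySem.List.pyRange_one_eq_nil (by omega)]
      simp
    · have hsplit2 : PySem.List.pyRange ((i : Int) + 1) ((i : Int) + (K : Int) + 1) 1
          = PySem.List.pyRange ((i : Int) + 1) ((i : Int) + 2) 1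
            ++ PySem.List.pyRange ((i : Int) + 2) ((i : Int) + (K : Int) + 1) 1 :=
        PySem.List.pyRange_one_append _ _ _ (by omega) (by omega)
      have hsing : PySem.List.pyRange ((i : Int) + 1) ((i : Int) + 2) 1 = [(i : Int) + 1] := by
        have := PySem.List.pyRange_one_singleton ((i : Int) + 1)
        rw [show (i : Int) + 2 = ((i : Int) + 1) + 1 by ring]
        exact this
      rw [hsplit2, List.filter_append, hsing]
      have hfirst : List.filter (fun j : Int => decide ((i : Int) + 2 ≤ j ∧ j ≤ (i : Int) + (K : Int))) [(i : Int) + 1] = [] := by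
        simp
      rw [hfirst, List.nil_append]
      have hself : (PySem.List.pyRange ((i : Int) + 2) ((i : Int) + (K : Int) + 1) 1).filter
          (fun j : Int => decide ((i : Int) + 2 ≤ j ∧ j ≤ (i : Int) + (K : Int))) =
          PySem.List.pyRange ((i : Int) + 2) ((i : Int) + (K : Int) + 1) 1 := by
        rw [List.filter_eq_self]
        intro j hj
        rw [PySem.List.mem_pyRange_one] at hj
        simp only [decide_eq_true_eq]
        omega
      rw [hself, PySem.List.pyRange_one, PySem.List.pyRange_one, List.map_map]
      rw [show ((i : Int) + (K : Int) + 1 - ((i : Int) + 2)).toNat = ((K : Int) + 1 - 2).toNat by omega]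
      apply List.map_congr_left
      intro k _
      simp only [Function.comp_apply]
      omega
  · -- step 1 justification, pointwise on the range
    intro acc' j hj
    rw [PySem.List.mem_pyRange_one] at hj
    have hslice : PySem.List.slice s1 (some (i : Int)) (some j) = (s1.drop i).take (j.toNat - i) := by
      rw [PySem.List.slice_toNat s1 (Int.natCast_nonneg i) (by omega : (0:Int) ≤ j)]
      simp
    have hlen : ((s1.drop i).take (j.toNat - i)).length = j.toNat - i := by
      simp only [List.length_take, List.length_drop]
      omega
    have hcast : (((j.toNat - i : Nat)) : Int) = j - (i : Int) := by omega
    have hiff : (PySem.Chars.isIn ((s1.drop i).take (j.toNat - i)) s2 = true) ↔ j.toNat - i ≤ K :=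
      ⟨fun h => hmax _ ⟨by omega, h⟩, fun h => (pvP_mono s1 s2 i h hPK).2⟩
    rw [hslice, hlen, hcast]
    simp only [decide_eq_true_eq]
    by_cases hc : ((i : Int) + 2 ≤ j ∧ j ≤ (i : Int) + (K : Int))
    · rw [if_pos (hiff.mpr (by omega)), if_pos (by omega : (1:Int) < j - (i : Int)), if_pos hc]
    · rw [if_neg hc]
      by_cases hIn : PySem.Chars.isIn ((s1.drop i).take (j.toNat - i)) s2 = true
      · have hle : j.toNat - i ≤ K := hiff.mp hIn
        rw [if_pos hIn, if_neg (by omega : ¬ (1:Int) < j - (i : Int))]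
      · rw [if_neg hIn]

-- the main loop correspondence: B carries (output, previous longest match) through the starts
lemma pvMain (s1 s2 : List Char) :
    ∀ m i Lc accA accB, m = s1.length - i → i ≤ s1.length →
      (Lc = 0 ∨ (1 ≤ i ∧ pvP s1 s2 (i - 1) Lc)) →
      accA = accB →
      (PySem.List.pyRange (i : Int) (s1.length : Int) 1).foldl (fun acc ii =>
        (PySem.List.pyRange (ii + 1) ((s1.length : Int) + 1) 1).foldl (fun acc j =>
          if PySem.Chars.isIn (PySem.List.slice s1 (some ii) (some j)) s2 then
            if 1 < ((PySem.List.slice s1 (some ii) (some j)).length : Int) then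
              acc ++ [((PySem.List.slice s1 (some ii) (some j)).length : Int)]
            else acc
          else acc) acc) accA
      = ((List.range' i (s1.length - i)).foldl (fun (st : List Int × Nat) ii =>
          let L0 := if st.2 ≠ 0 then st.2 - 1 else st.2
          let K := pvExtend s1 s2 ii L0
          (st.1 ++ PySem.List.pyRange 2 ((K : Int) + 1) 1, K)) (accB, Lc)).1 := by
  intro m
  induction m with
  | zero =>
    intro i Lc accA accB hm hi hinv hacc
    have hieq : i = s1.length := by omega
    subst hieq
    rw [PySem.List.pyRange_one_eq_nil (le_refl _), Nat.sub_self, List.range'_zero]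
    simpa using hacc
  | succ m ih =>
    intro i Lc accA accB hm hi hinv hacc
    have hlt : i < s1.length := by omega
    rw [PySem.List.pyRange_one_cons (by exact_mod_cast hlt),
        show s1.length - i = m + 1 by omega, List.range'_succ]
    simp only [List.foldl_cons]
    have hP0 : pvP s1 s2 i (if Lc ≠ 0 then Lc - 1 else Lc) := by
      rcases Nat.eq_zero_or_pos Lc with h0 | hpos
      · subst h0
        rw [if_neg (fun h => h rfl)]
        exact ⟨by omega, by simp [PySem.Chars.isIn_nil]⟩
      · have hne : Lc ≠ 0 := by omega
        rw [if_pos hne]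
        rcases hinv with h0 | ⟨h1, hP⟩
        · omega
        · have hsh := pvP_shift s1 s2 (i - 1) Lc hpos hP
          rw [Nat.sub_add_cancel h1] at hsh
          exact hsh
    obtain ⟨hPK, hmax⟩ := pvExtend_spec s1 s2 i _ hP0
    have hc2 : ((i : Int) + 1) = (((i + 1 : Nat)) : Int) := by push_cast; ring
    rw [pvInnerA s1 s2 i _ hlt hPK hmax accA, hc2]
    rw [show m = s1.length - (i + 1) by omega]
    exact ih (i + 1) _ _ _ (by omega) (by omega) (Or.inr ⟨by omega, by simpa using hPK⟩) (by rw [hacc])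
-- ===== VERDICT (by name: the statement is the Claim_ definition above) =====
theorem find_common_string_spec : Claim_equal_find_common_string := by
  intro string1 string2 _
  unfold Spec_find_common_string find_common_string find_common_string_alt
  simp only [PySem.Str.len_eq, PySem.Str.isIn_eq, PySem.Str.toList_slice,
    PySem.Chars.slice_eq_listSlice]
  rw [List.range_eq_range']
  have h := pvMain string1.toList string2.toList string1.toList.length 0 0 [] []
    (by omega) (by omega) (Or.inl rfl) rfl
  rw [Nat.sub_zero] at h
  simpa using h
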